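-- pv_equiv track=rewrite | github.com/linuxhenhao/simple-reverse-proxy | tornado_proxy/util.py | get_same_level_domain_from_host
-- ===== SOURCE A (Python) =====
-- def get_same_level_domain_from_host(host,domain):
--     dot_counts = domain.count('.')
--     def get_domain(counts,host):
--         last_pos = None
--         while(counts != 0):
--             last_pos = host.rfind('.',0,last_pos)
--             if(last_pos == -1):
--                 return host
--             counts = counts - 1
--         return host[last_pos+1:]
--
--     if(domain[0]=='.'): #format .google.com
--         counts = dot_counts
--         return '.'+get_domain(counts,host)
--     else:
--         counts =dot_counts+1
--         return get_domain(counts,host)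
-- ===== SOURCE B (Python) =====
-- def get_same_level_domain_from_host(host, domain):
--     counts = domain.count('.') + (0 if domain.startswith('.') else 1)
--     tail = '.'.join(host.split('.')[-counts:])
--     return '.' + tail if domain.startswith('.') else tail
-- ===== Notes on version B (the rewrite author's own statement) =====
-- stated objective: idiomatic
-- what changed: B replaces A's backward rfind-peeling loop over the host string with a single host.split('.') followed by a saturating negative slice of the last `counts` labels and a '.'.join, so no repeated backward scans and no index arithmetic remain.
import Mathlib
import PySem

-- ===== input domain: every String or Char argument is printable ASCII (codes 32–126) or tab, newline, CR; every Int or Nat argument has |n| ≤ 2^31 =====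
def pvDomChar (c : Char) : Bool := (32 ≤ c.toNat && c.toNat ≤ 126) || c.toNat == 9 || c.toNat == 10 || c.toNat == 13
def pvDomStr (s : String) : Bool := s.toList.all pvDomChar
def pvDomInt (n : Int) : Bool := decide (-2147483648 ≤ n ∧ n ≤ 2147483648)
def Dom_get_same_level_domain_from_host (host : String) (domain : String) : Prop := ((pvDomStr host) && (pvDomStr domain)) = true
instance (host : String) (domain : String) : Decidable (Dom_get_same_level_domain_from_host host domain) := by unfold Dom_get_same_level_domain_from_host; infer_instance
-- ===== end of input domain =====

-- B replaces A's backward rfind-peeling loop with split('.') + a saturating negative slice + join (idiomatic, same result).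

-- ===== PORT A =====
-- hand port of host.rfind('.', 0, e) applied to the already-taken prefix: index of the LAST '.' in l, none = -1
-- (exact for the single-character needle '.' A uses)
def pvRfindDot : List Char → Option Nat
  | [] => none
  | c :: t =>
    match pvRfindDot t with
    | some i => some (i + 1)
    | none => if c = '.' then some 0 else none

-- the `while counts != 0` loop of A's inner get_domain; lastPos none = Python's initial None
def pvGetDomainLoop : Nat → Option Nat → List Char → List Char
  | 0, lastPos, host =>
    match lastPos with
    | some p => host.drop (p + 1)          -- return host[last_pos+1:]
    | none => host                          -- unreachable from A's calls (counts ≥ 1 there)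
  | (k+1), lastPos, host =>
    match pvRfindDot (host.take (lastPos.getD host.length)) with   -- last_pos = host.rfind('.', 0, last_pos)
    | none => host                          -- if last_pos == -1: return host
    | some p => pvGetDomainLoop k (some p) host

def pvACore (hostL : List Char) (domainL : List Char) : List Char :=
  let dot_counts := PySem.Chars.count domainL ['.']
  match PySem.List.pyGet? domainL 0 with    -- domain[0]; none = IndexError (excluded by Pre_)
  | none => []
  | some c =>
    if c = '.' then '.' :: pvGetDomainLoop dot_counts none hostL
    else pvGetDomainLoop (dot_counts + 1) none hostL

def get_same_level_domain_from_host (host : String) (domain : String) : String :=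
  String.ofList (pvACore host.toList domain.toList)

-- ===== PORT B =====
def pvBCore (hostL : List Char) (domainL : List Char) : List Char :=
  let startsDot := PySem.Chars.startswith domainL ['.']
  let counts : Nat := PySem.Chars.count domainL ['.'] + (if startsDot then 0 else 1)
  -- host.split('.') (sep nonempty, so Python split = Chars.splitOn), sliced [-counts:], '.'-joined
  let tail := PySem.Chars.join ['.']
      (PySem.List.slice (PySem.Chars.splitOn hostL ['.']) (some (-(counts : Int))) none)
  if startsDot then '.' :: tail else tail

def get_same_level_domain_from_host_alt (host : String) (domain : String) : String :=
  String.ofList (pvBCore host.toList domain.toList)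

-- ===== PRECONDITION & SPEC =====
-- Pre_ excludes only the empty domain, on which A raises IndexError at domain[0].
def Pre_get_same_level_domain_from_host (host : String) (domain : String) : Prop := domain.toList ≠ []
instance (host : String) (domain : String) : Decidable (Pre_get_same_level_domain_from_host host domain) := by unfold Pre_get_same_level_domain_from_host; infer_instance

def pvWitness_get_same_level_domain_from_host : String × String := ("www.google.com", "google.com")

def Spec_get_same_level_domain_from_host (host : String) (domain : String) (out : String) : Prop := out = get_same_level_domain_from_host_alt host domain
instance (host : String) (domain : String) (out : String) : Decidable (Spec_get_same_level_domain_from_host host domain out) := by unfold Spec_get_same_level_domain_from_host; infer_instance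

-- ===== CLAIM (what is proved, stated in full; the proofs are below) =====
def Claim_equal_get_same_level_domain_from_host : Prop := ∀ (host : String) (domain : String), Dom_get_same_level_domain_from_host host domain → Pre_get_same_level_domain_from_host host domain → Spec_get_same_level_domain_from_host host domain (get_same_level_domain_from_host host domain)

-- ===== LEMMAS AND PROOFS =====

-- proof-side mirror of Python's split('.') (single-character separator)
def pvSplitDot : List Char → List (List Char)
  | [] => [[]]
  | c :: t =>
    if c = '.' then [] :: pvSplitDot t
    else
      match pvSplitDot t with
      | [] => [[c]]      -- unreachable: pvSplitDot is never []
      | h :: r => (c :: h) :: r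

def pvConsHead (pre : List Char) : List (List Char) → List (List Char)
  | [] => []
  | h :: r => (pre ++ h) :: r

theorem pvSplitDot_ne_nil (cs : List Char) : pvSplitDot cs ≠ [] := by
  induction cs with
  | nil => simp [pvSplitDot]
  | cons c t ih =>
    simp only [pvSplitDot]
    split
    · simp
    · split
      · simp
      · simp

theorem pvSplitDot_nodot (cs : List Char) (h : '.' ∉ cs) : pvSplitDot cs = [cs] := by
  induction cs with
  | nil => rfl
  | cons c t ih =>
    simp only [List.mem_cons, not_or] at h
    have hc : ¬ c = '.' := fun hc => h.1 hc.symm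
    simp only [pvSplitDot, if_neg hc, ih h.2]

theorem pvSplitDot_append (a b : List Char) (h : '.' ∉ b) :
    pvSplitDot (a ++ '.' :: b) = pvSplitDot a ++ [b] := by
  induction a with
  | nil => simp [pvSplitDot, pvSplitDot_nodot b h]
  | cons c t ih =>
    by_cases hc : c = '.'
    · simp [pvSplitDot, hc, ih]
    · simp only [List.cons_append, pvSplitDot, if_neg hc, ih]
      cases ht : pvSplitDot t with
      | nil => exact absurd ht (pvSplitDot_ne_nil t)
      | cons h r => simp

theorem pvSplitOn_go (l : List Char) : ∀ (fuel : Nat) (cur : List Char) (acc : List (List Char)),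
    l.length ≤ fuel →
    PySem.Chars.splitOn.go ['.'] fuel l cur acc = acc.reverse ++ pvConsHead cur.reverse (pvSplitDot l) := by
  induction l with
  | nil =>
    intro fuel cur acc _
    cases fuel with
    | zero => simp [PySem.Chars.splitOn.go, pvSplitDot, pvConsHead]
    | succ f => simp [PySem.Chars.splitOn.go, pvSplitDot, pvConsHead]
  | cons c t ih =>
    intro fuel cur acc hf
    cases fuel with
    | zero => simp at hf
    | succ f =>
      simp only [List.length_cons, Nat.add_le_add_iff_right] at hf
      by_cases hc : c = '.'
      · have hpre : List.isPrefixOf ['.'] (c :: t) = true := by simp [List.isPrefixOf, hc]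
        rw [PySem.Chars.splitOn.go]
        simp only [hpre, if_pos]
        simp only [List.length_cons, List.length_nil, List.drop_succ_cons, List.drop_zero]
        rw [ih f [] (cur.reverse :: acc) (by simpa using hf)]
        simp [pvSplitDot, hc, pvConsHead]
        cases hs : pvSplitDot t with
        | nil => exact absurd hs (pvSplitDot_ne_nil t)
        | cons h r => simp
      · have hpre : List.isPrefixOf ['.'] (c :: t) = false := by
          simp [List.isPrefixOf]
          exact fun h => absurd h.symm hc
        rw [PySem.Chars.splitOn.go]
        simp only [hpre]
        rw [ih f (c :: cur) acc hf]
        simp only [pvSplitDot, if_neg hc, List.reverse_cons]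
        cases hs : pvSplitDot t with
        | nil => exact absurd hs (pvSplitDot_ne_nil t)
        | cons h r => simp [pvConsHead]

theorem pvSplitOn_eq (cs : List Char) : PySem.Chars.splitOn cs ['.'] = pvSplitDot cs := by
  rw [PySem.Chars.splitOn, pvSplitOn_go cs (cs.length + 1) [] [] (by omega)]
  cases hs : pvSplitDot cs with
  | nil => exact absurd hs (pvSplitDot_ne_nil cs)
  | cons h r => simp [pvConsHead]

theorem pvRfindDot_lt (l : List Char) : ∀ (p : Nat), pvRfindDot l = some p → p < l.length := by
  induction l with
  | nil => intro p h; simp [pvRfindDot] at h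
  | cons c t ih =>
    intro p h
    simp only [pvRfindDot] at h
    cases ht : pvRfindDot t with
    | some i =>
      rw [ht] at h
      simp at h
      have := ih i ht
      simp [← h]
      omega
    | none =>
      rw [ht] at h
      by_cases hc : c = '.'
      · simp [hc] at h; simp [← h]
      · simp [hc] at h

theorem pvRfindDot_none_iff (l : List Char) : pvRfindDot l = none ↔ '.' ∉ l := by
  induction l with
  | nil => simp [pvRfindDot]
  | cons c t ih =>
    simp only [pvRfindDot, List.mem_cons]
    cases ht : pvRfindDot t with
    | some i =>
      simp only
      constructor
      · intro h; simp at h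
      · intro h
        exact absurd (ih.mpr (fun hm => h (Or.inr hm))) (by simp [ht])
    | none =>
      by_cases hc : c = '.'
      · simp [hc]
      · simp only [if_neg hc]
        rw [ht] at ih
        simp at ih
        constructor
        · intro _ h
          rcases h with h | h
          · exact hc h.symm
          · exact ih h
        · intro _; trivial

theorem pvRfindDot_append (a b : List Char) (h : '.' ∉ b) :
    pvRfindDot (a ++ '.' :: b) = some a.length := by
  induction a with
  | nil =>
    simp only [List.nil_append, pvRfindDot]
    rw [(pvRfindDot_none_iff b).mpr h]
    simp
  | cons c t ih =>
    simp only [List.cons_append, pvRfindDot, ih]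
    simp

theorem pvJoin_append_singleton (ys : List (List Char)) (b : List Char) (h : ys ≠ []) :
    PySem.Chars.join ['.'] (ys ++ [b]) = PySem.Chars.join ['.'] ys ++ '.' :: b := by
  induction ys with
  | nil => exact absurd rfl h
  | cons y t ih =>
    cases t with
    | nil => simp [PySem.Chars.join, List.intercalate]
    | cons z r =>
      have := ih (by simp)
      simp only [List.cons_append]
      rw [PySem.Chars.join_cons_cons, PySem.Chars.join_cons_cons]
      rw [show z :: (r ++ [b]) = (z :: r) ++ [b] by simp, this]
      simp

theorem pvCount_go_mono (sub : List Char) : ∀ (fuel : Nat) (l : List Char) (acc : Nat),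
    acc ≤ PySem.Chars.count.go sub fuel l acc := by
  intro fuel
  induction fuel with
  | zero => intro l acc; simp [PySem.Chars.count.go]
  | succ f ih =>
    intro l acc
    cases l with
    | nil => simp [PySem.Chars.count.go]
    | cons c t =>
      rw [PySem.Chars.count.go]
      split
      · exact le_trans (by omega) (ih _ _)
      · exact ih _ _

theorem pvCount_pos (t : List Char) : 1 ≤ PySem.Chars.count ('.' :: t) ['.'] := by
  rw [PySem.Chars.count]
  simp only [List.isEmpty_cons, if_false, Bool.false_eq_true]
  have h1 : PySem.Chars.count.go ['.'] ('.' :: t).length ('.' :: t) 0 =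
      PySem.Chars.count.go ['.'] t.length t 1 := by
    rw [show ('.' :: t).length = t.length + 1 by simp, PySem.Chars.count.go]
    simp [List.isPrefixOf]
  rw [h1]
  exact pvCount_go_mono ['.'] t.length t 1

theorem pvLoop_inner_append (a b : List Char) :
    ∀ (j q : Nat), q < a.length →
      pvGetDomainLoop j (some q) (a ++ '.' :: b) = pvGetDomainLoop j (some q) a ++ '.' :: b := by
  intro j
  induction j with
  | zero =>
    intro q hq
    simp only [pvGetDomainLoop]
    rw [List.drop_append_of_le_length (by omega)]
  | succ k ih =>
    intro q hq
    simp only [pvGetDomainLoop, Option.getD_some]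
    rw [List.take_append_of_le_length (by omega)]
    cases hr : pvRfindDot (a.take q) with
    | none => simp
    | some p =>
      simp only
      have hp : p < q := by
        have := pvRfindDot_lt _ _ hr
        simpa [List.length_take, Nat.lt_min] using (by
          have hl : (a.take q).length = q := by simp [List.length_take]; omega
          rw [hl] at this; exact this)
      exact ih p (by omega)

theorem pvLoop_found_append (a b : List Char) (j : Nat) :
    pvGetDomainLoop (j+1) (some a.length) (a ++ '.' :: b) = pvGetDomainLoop (j+1) none a ++ '.' :: b := by
  simp only [pvGetDomainLoop, Option.getD_some, Option.getD_none]
  rw [List.take_append_of_le_length (le_refl _), List.take_length]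
  cases hr : pvRfindDot a with
  | none => simp
  | some p =>
    simp only
    exact pvLoop_inner_append a b j p (pvRfindDot_lt a p hr)

-- every list containing '.' splits at its LAST dot
theorem pvLastDot (cs : List Char) (h : '.' ∈ cs) :
    ∃ a b, cs = a ++ '.' :: b ∧ '.' ∉ b := by
  induction cs with
  | nil => simp at h
  | cons c t ih =>
    by_cases ht : '.' ∈ t
    · obtain ⟨a, b, rfl, hb⟩ := ih ht
      exact ⟨c :: a, b, rfl, hb⟩
    · have hc : c = '.' := by
        rcases List.mem_cons.mp h with h | h
        · exact h.symm
        · exact absurd h ht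
      exact ⟨[], t, by rw [hc]; simp, ht⟩

-- A's loop peeling k+1 dots from the right = '.'-join of the last k+1 split labels
theorem pvMain : ∀ (n : Nat) (cs : List Char) (k : Nat), cs.length ≤ n →
    pvGetDomainLoop (k+1) none cs =
      PySem.Chars.join ['.']
        ((pvSplitDot cs).drop ((pvSplitDot cs).length - (k+1))) := by
  intro n
  induction n with
  | zero =>
    intro cs k h
    have : cs = [] := List.eq_nil_of_length_eq_zero (by omega)
    subst this
    simp [pvGetDomainLoop, pvRfindDot, pvSplitDot]
  | succ n ih =>
    intro cs k hlen
    by_cases hdot : '.' ∈ cs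
    · obtain ⟨a, b, rfl, hb⟩ := pvLastDot cs hdot
      have hsplit := pvSplitDot_append a b hb
      have hfind := pvRfindDot_append a b hb
      have hne := pvSplitDot_ne_nil a
      have step : pvGetDomainLoop (k+1) none (a ++ '.' :: b) =
          pvGetDomainLoop k (some a.length) (a ++ '.' :: b) := by
        simp only [pvGetDomainLoop, Option.getD_none]
        rw [List.take_length, hfind]
      rw [step]
      cases k with
      | zero =>
        simp only [pvGetDomainLoop]
        rw [hsplit]
        rw [show a.length + 1 = (a ++ ['.']).length by simp,
            show a ++ '.' :: b = (a ++ ['.']) ++ b by simp,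
            List.drop_left]
        have hlen2 : (pvSplitDot a ++ [b]).length = (pvSplitDot a).length + 1 := by simp
        rw [hlen2, Nat.add_sub_cancel,
            show (pvSplitDot a).length = (pvSplitDot a).length + 0 by omega]
        rw [List.drop_append]
        simp
      | succ j =>
        rw [pvLoop_found_append a b j]
        have ha : a.length ≤ n := by
          simp only [List.length_append, List.length_cons] at hlen
          omega
        rw [ih a j ha, hsplit]
        set xs := pvSplitDot a with hxs
        have hm : 1 ≤ xs.length := by
          cases hx : xs with
          | nil => exact absurd hx hne
          | cons u v => simp
        have hlen2 : (xs ++ [b]).length = xs.length + 1 := by simp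
        rw [hlen2]
        have harith : xs.length + 1 - (j + 1 + 1) = xs.length - (j + 1) := by omega
        rw [harith]
        rw [List.drop_append_of_le_length (by omega)]
        have hnonempty : xs.drop (xs.length - (j + 1)) ≠ [] := by
          have : (xs.drop (xs.length - (j + 1))).length = xs.length - (xs.length - (j+1)) := by simp
          intro hcontra
          rw [hcontra] at this
          simp at this
          omega
        rw [pvJoin_append_singleton _ b hnonempty]
    · have : pvRfindDot cs = none := (pvRfindDot_none_iff cs).mpr hdot
      simp only [pvGetDomainLoop, Option.getD_none]
      rw [List.take_length, this, pvSplitDot_nodot cs hdot]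
      simp

theorem pvCore_eq (hostL : List Char) (c : Char) (t : List Char) :
    pvACore hostL (c :: t) = pvBCore hostL (c :: t) := by
  have hsw : PySem.Chars.startswith (c :: t) ['.'] = decide (c = '.') := by
    simp [PySem.Chars.startswith, List.isPrefixOf, eq_comm, BEq.beq]
  have hget : PySem.List.pyGet? (c :: t) (0 : Int) = some c := by
    simp [PySem.List.pyGet?, PySem.List.pyIdx?]
  have key : ∀ k : Nat, pvGetDomainLoop (k + 1) none hostL =
      PySem.Chars.join ['.'] (PySem.List.slice (PySem.Chars.splitOn hostL ['.'])
        (some (-((k + 1 : Nat) : Int))) none) := by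
    intro k
    rw [pvSplitOn_eq, PySem.List.slice_from_neg_natCast _ (k+1) (by omega)]
    exact pvMain hostL.length hostL k (le_refl _)
  by_cases hc : c = '.'
  · subst hc
    obtain ⟨j, hj⟩ : ∃ j, PySem.Chars.count ('.' :: t) ['.'] = j + 1 :=
      ⟨PySem.Chars.count ('.' :: t) ['.'] - 1, by have := pvCount_pos t; omega⟩
    simp only [pvACore, pvBCore, hget, hsw, decide_true, if_true, Nat.add_zero]
    rw [hj, key j]
  · simp only [pvACore, pvBCore, hget, hsw]
    rw [if_neg hc, if_neg (by simp [hc]), if_neg (by simp [hc])]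
    exact key (PySem.Chars.count (c :: t) ['.'])

-- ===== VERDICT (by name: the statement is the Claim_ definition above) =====
theorem get_same_level_domain_from_host_spec : Claim_equal_get_same_level_domain_from_host := by
  intro host domain _ hpre
  unfold Spec_get_same_level_domain_from_host get_same_level_domain_from_host get_same_level_domain_from_host_alt
  cases hd : domain.toList with
  | nil => exact absurd hd hpre
  | cons c t => rw [pvCore_eq]
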